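-- pv_equiv track=rewrite | github.com/choi-seoghwan/Python_Predict_Lotto | predict.py | addColorNums
-- ===== SOURCE A (Python) =====
-- def addColorNums(possible_nums):
--     color_1 = {1,2,3,4,5,6,7,8,9,10}
--     color_2 = {11,12,13,14,15,16,17,18,19,20}
--     color_3 = {21,22,23,24,25,26,27,28,29,30}
--     color_4 = {31,32,33,34,35,36,37,38,39,40}
--     color_5 = {41,42,43,44,45}
--
--     add_color_nums = []
--     for i in possible_nums:
--         color_count = 0
--         if len(set(i).intersection(color_1)) > 0 :
--             color_count += 1
--         if len(set(i).intersection(color_2)) > 0 :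
--             color_count += 1
--         if len(set(i).intersection(color_3)) > 0 :
--             color_count += 1
--         if len(set(i).intersection(color_4)) > 0 :
--             color_count += 1
--         if len(set(i).intersection(color_5)) > 0 :
--             color_count += 1
--
--         if 2 < color_count < 6:
--                 add_color_nums.append(i)
--
--     return add_color_nums
-- ===== SOURCE B (Python) =====
-- def addColorNums(possible_nums):
--     result = []
--     for combo in possible_nums:
--         bands = set()
--         for x in combo:
--             if 1 <= x <= 45:
--                 bands.add((x - 1) // 10)
--         if 3 <= len(bands) <= 5:
--             result.append(combo)
--     return result
-- ===== Notes on version B (the rewrite author's own statement) =====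
-- stated objective: simpler
-- what changed: Instead of intersecting set(i) with five fixed colour sets and summing five membership flags, B maps each in-range number to its band index (x-1)//10 into one set and tests 3 <= len(bands) <= 5 directly.
import Mathlib
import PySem

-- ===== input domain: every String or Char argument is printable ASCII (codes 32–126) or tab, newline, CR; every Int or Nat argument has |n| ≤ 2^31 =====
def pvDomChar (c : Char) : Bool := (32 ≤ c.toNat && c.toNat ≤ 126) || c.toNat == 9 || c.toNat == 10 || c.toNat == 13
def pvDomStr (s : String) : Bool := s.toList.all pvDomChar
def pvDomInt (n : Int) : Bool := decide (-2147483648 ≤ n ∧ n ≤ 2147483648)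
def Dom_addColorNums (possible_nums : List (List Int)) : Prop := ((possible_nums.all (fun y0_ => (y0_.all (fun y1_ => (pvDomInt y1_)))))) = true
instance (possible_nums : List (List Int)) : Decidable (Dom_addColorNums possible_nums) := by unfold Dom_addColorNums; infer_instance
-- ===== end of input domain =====

-- B replaces A's five fixed-colour-set intersections per combination by one pass that
-- collects band indices (x-1)//10 of in-range numbers in a single set (objective: simpler).

-- ===== PORT A =====
def pvColor1 : PySem.Set Int := PySem.Set.ofList [1,2,3,4,5,6,7,8,9,10]
def pvColor2 : PySem.Set Int := PySem.Set.ofList [11,12,13,14,15,16,17,18,19,20]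
def pvColor3 : PySem.Set Int := PySem.Set.ofList [21,22,23,24,25,26,27,28,29,30]
def pvColor4 : PySem.Set Int := PySem.Set.ofList [31,32,33,34,35,36,37,38,39,40]
def pvColor5 : PySem.Set Int := PySem.Set.ofList [41,42,43,44,45]

def pvColorCount (i : List Int) : Int :=
  let c0 : Int := 0
  let c1 := if 0 < PySem.Set.len (PySem.Set.inter (PySem.Set.ofList i) pvColor1) then c0 + 1 else c0
  let c2 := if 0 < PySem.Set.len (PySem.Set.inter (PySem.Set.ofList i) pvColor2) then c1 + 1 else c1
  let c3 := if 0 < PySem.Set.len (PySem.Set.inter (PySem.Set.ofList i) pvColor3) then c2 + 1 else c2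
  let c4 := if 0 < PySem.Set.len (PySem.Set.inter (PySem.Set.ofList i) pvColor4) then c3 + 1 else c3
  let c5 := if 0 < PySem.Set.len (PySem.Set.inter (PySem.Set.ofList i) pvColor5) then c4 + 1 else c4
  c5

def addColorNums (possible_nums : List (List Int)) : List (List Int) :=
  possible_nums.foldl (fun add_color_nums i =>
    let color_count := pvColorCount i
    if 2 < color_count ∧ color_count < 6 then add_color_nums ++ [i] else add_color_nums) []

-- ===== PORT B =====
def pvBands (combo : List Int) : PySem.Set Int :=
  combo.foldl (fun bands x =>
    if 1 ≤ x ∧ x ≤ 45 then PySem.Set.add bands (PySem.Int.floordiv (x - 1) 10) else bands)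
    PySem.Set.empty

def addColorNums_alt (possible_nums : List (List Int)) : List (List Int) :=
  possible_nums.foldl (fun result combo =>
    let n := PySem.Set.len (pvBands combo)
    if 3 ≤ n ∧ n ≤ 5 then result ++ [combo] else result) []

-- ===== PRECONDITION & SPEC =====
def Spec_addColorNums (possible_nums : List (List Int)) (out : List (List Int)) : Prop := out = addColorNums_alt possible_nums
instance (possible_nums : List (List Int)) (out : List (List Int)) : Decidable (Spec_addColorNums possible_nums out) := by unfold Spec_addColorNums; infer_instance

-- ===== CLAIM (what is proved, stated in full; the proofs are below) =====
def Claim_equal_addColorNums : Prop := ∀ (possible_nums : List (List Int)), Dom_addColorNums possible_nums → Spec_addColorNums possible_nums (addColorNums possible_nums)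

-- ===== LEMMAS AND PROOFS =====

-- membership in the band set built by B's inner loop
theorem mem_pvBands_fold (combo : List Int) (s : PySem.Set Int) (y : Int) :
    y ∈ combo.foldl (fun bands x =>
      if 1 ≤ x ∧ x ≤ 45 then PySem.Set.add bands (PySem.Int.floordiv (x - 1) 10) else bands) s ↔
    y ∈ s ∨ ∃ x ∈ combo, 1 ≤ x ∧ x ≤ 45 ∧ y = PySem.Int.floordiv (x - 1) 10 := by
  induction combo generalizing s with
  | nil => simp
  | cons a t ih =>
    simp only [List.foldl_cons]
    split_ifs with h
    · rw [ih]
      simp only [PySem.Set.mem_add, List.mem_cons]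
      constructor
      · rintro ((hs | hy) | ⟨x, hx, h1, h2, hy⟩)
        · exact Or.inl hs
        · exact Or.inr ⟨a, Or.inl rfl, h.1, h.2, hy⟩
        · exact Or.inr ⟨x, Or.inr hx, h1, h2, hy⟩
      · rintro (hs | ⟨x, (rfl | hx), h1, h2, hy⟩)
        · exact Or.inl (Or.inl hs)
        · exact Or.inl (Or.inr hy)
        · exact Or.inr ⟨x, hx, h1, h2, hy⟩
    · rw [ih]
      simp only [List.mem_cons]
      constructor
      · rintro (hs | ⟨x, hx, h1, h2, hy⟩)
        · exact Or.inl hs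
        · exact Or.inr ⟨x, Or.inr hx, h1, h2, hy⟩
      · rintro (hs | ⟨x, (rfl | hx), h1, h2, hy⟩)
        · exact Or.inl hs
        · exact absurd ⟨h1, h2⟩ h
        · exact Or.inr ⟨x, hx, h1, h2, hy⟩

theorem mem_pvBands (combo : List Int) (y : Int) :
    y ∈ pvBands combo ↔ ∃ x ∈ combo, 1 ≤ x ∧ x ≤ 45 ∧ y = PySem.Int.floordiv (x - 1) 10 := by
  unfold pvBands
  rw [mem_pvBands_fold]
  simp [PySem.Set.empty]

theorem nodup_pvBands_fold (combo : List Int) (s : PySem.Set Int) (hs : s.Nodup) :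
    (combo.foldl (fun bands x =>
      if 1 ≤ x ∧ x ≤ 45 then PySem.Set.add bands (PySem.Int.floordiv (x - 1) 10) else bands) s).Nodup := by
  induction combo generalizing s with
  | nil => simpa
  | cons a t ih =>
    simp only [List.foldl_cons]
    split_ifs with h
    · exact ih _ (PySem.Set.nodup_add _ _ hs)
    · exact ih _ hs

theorem nodup_pvBands (combo : List Int) : (pvBands combo).Nodup :=
  nodup_pvBands_fold combo _ (by simp [PySem.Set.empty])

-- a nodup list included in a nodup list T has the length of T's filter by membership
theorem length_eq_filter_of_nodup (S T : List Int) (hS : S.Nodup) (hT : T.Nodup)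
    (hsub : ∀ y ∈ S, y ∈ T) :
    S.length = (T.filter (fun t => decide (t ∈ S))).length := by
  have hft : (T.filter (fun t => decide (t ∈ S))).Nodup := hT.filter _
  have hperm : S.Perm (T.filter (fun t => decide (t ∈ S))) := by
    rw [List.perm_ext_iff_of_nodup hS hft]
    intro a
    simp only [List.mem_filter, decide_eq_true_eq]
    exact ⟨fun h => ⟨hsub a h, h⟩, fun h => h.2⟩
  exact hperm.length_eq

theorem pvBands_subset (combo : List Int) : ∀ y ∈ pvBands combo, y ∈ ([0,1,2,3,4] : List Int) := by
  intro y hy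
  rw [mem_pvBands] at hy
  obtain ⟨x, _, h1, h2, rfl⟩ := hy
  rw [PySem.Int.floordiv_eq_ediv_of_pos (by omega : (0:Int) < 10)]
  simp only [List.mem_cons, List.not_mem_nil, or_false]
  omega

-- band-membership characterisations
theorem band_iff (combo : List Int) (b lo hi : Int) (hb : 0 ≤ b) (hb4 : b ≤ 4)
    (hlo : lo = 10 * b + 1) (hhi : hi = min (10 * b + 10) 45) :
    ((b : Int) ∈ pvBands combo ↔ ∃ x ∈ combo, lo ≤ x ∧ x ≤ hi) := by
  rw [mem_pvBands]
  constructor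
  · rintro ⟨x, hx, h1, h2, hfd⟩
    rw [PySem.Int.floordiv_eq_ediv_of_pos (by omega : (0:Int) < 10)] at hfd
    exact ⟨x, hx, by omega, by omega⟩
  · rintro ⟨x, hx, h1, h2⟩
    refine ⟨x, hx, by omega, by omega, ?_⟩
    rw [PySem.Int.floordiv_eq_ediv_of_pos (by omega : (0:Int) < 10)]
    omega

-- A's intersection test means "some element of i lies in the colour set"
theorem inter_pos_iff (i : List Int) (c : PySem.Set Int) :
    (0 < PySem.Set.len (PySem.Set.inter (PySem.Set.ofList i) c)) ↔ ∃ x ∈ i, x ∈ c := by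
  simp only [PySem.Set.len]
  rw [Int.lt_iff_add_one_le, zero_add, Int.toNat_le.symm]
  constructor
  · intro h
    have hne : PySem.Set.inter (PySem.Set.ofList i) c ≠ [] := by
      intro hnil; rw [hnil] at h; simp at h
    obtain ⟨x, hx⟩ := List.exists_mem_of_ne_nil _ hne
    rw [PySem.Set.mem_inter] at hx
    exact ⟨x, (PySem.Set.mem_ofList i x).mp hx.1, hx.2⟩
  · rintro ⟨x, hx, hc⟩
    have : x ∈ PySem.Set.inter (PySem.Set.ofList i) c :=
      (PySem.Set.mem_inter _ _ _).mpr ⟨(PySem.Set.mem_ofList i x).mpr hx, hc⟩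
    have := List.length_pos_of_mem this
    omega

-- the per-combination key fact: A's colour count equals the size of B's band set
theorem mem_color_iff (x : Int) :
    (x ∈ pvColor1 ↔ 1 ≤ x ∧ x ≤ 10) ∧ (x ∈ pvColor2 ↔ 11 ≤ x ∧ x ≤ 20) ∧
    (x ∈ pvColor3 ↔ 21 ≤ x ∧ x ≤ 30) ∧ (x ∈ pvColor4 ↔ 31 ≤ x ∧ x ≤ 40) ∧
    (x ∈ pvColor5 ↔ 41 ≤ x ∧ x ≤ 45) := by
  refine ⟨?_, ?_, ?_, ?_, ?_⟩ <;>
    · simp only [pvColor1, pvColor2, pvColor3, pvColor4, pvColor5, PySem.Set.mem_ofList,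
        List.mem_cons, List.not_mem_nil, or_false]
      omega

theorem len_pvBands_eq_filter (i : List Int) :
    PySem.Set.len (pvBands i) =
      ((List.filter (fun t => decide (t ∈ pvBands i)) [0,1,2,3,4]).length : Int) := by
  simp only [PySem.Set.len]
  rw [length_eq_filter_of_nodup (pvBands i) [0,1,2,3,4] (nodup_pvBands i) (by decide)
    (pvBands_subset i)]

theorem count_eq_len (i : List Int) : pvColorCount i = PySem.Set.len (pvBands i) := by
  have m1 : (0 < PySem.Set.len (PySem.Set.inter (PySem.Set.ofList i) pvColor1)) ↔ (0:Int) ∈ pvBands i := by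
    rw [inter_pos_iff, band_iff i 0 1 10 (by omega) (by omega) (by omega) (by omega)]
    exact exists_congr fun x => and_congr_right fun _ => (mem_color_iff x).1
  have m2 : (0 < PySem.Set.len (PySem.Set.inter (PySem.Set.ofList i) pvColor2)) ↔ (1:Int) ∈ pvBands i := by
    rw [inter_pos_iff, band_iff i 1 11 20 (by omega) (by omega) (by omega) (by omega)]
    exact exists_congr fun x => and_congr_right fun _ => (mem_color_iff x).2.1
  have m3 : (0 < PySem.Set.len (PySem.Set.inter (PySem.Set.ofList i) pvColor3)) ↔ (2:Int) ∈ pvBands i := by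
    rw [inter_pos_iff, band_iff i 2 21 30 (by omega) (by omega) (by omega) (by omega)]
    exact exists_congr fun x => and_congr_right fun _ => (mem_color_iff x).2.2.1
  have m4 : (0 < PySem.Set.len (PySem.Set.inter (PySem.Set.ofList i) pvColor4)) ↔ (3:Int) ∈ pvBands i := by
    rw [inter_pos_iff, band_iff i 3 31 40 (by omega) (by omega) (by omega) (by omega)]
    exact exists_congr fun x => and_congr_right fun _ => (mem_color_iff x).2.2.2.1
  have m5 : (0 < PySem.Set.len (PySem.Set.inter (PySem.Set.ofList i) pvColor5)) ↔ (4:Int) ∈ pvBands i := by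
    rw [inter_pos_iff, band_iff i 4 41 45 (by omega) (by omega) (by omega) (by omega)]
    exact exists_congr fun x => and_congr_right fun _ => (mem_color_iff x).2.2.2.2
  rw [len_pvBands_eq_filter]
  unfold pvColorCount
  simp only [m1, m2, m3, m4, m5]
  by_cases k0 : (0:Int) ∈ pvBands i <;> by_cases k1 : (1:Int) ∈ pvBands i <;>
    by_cases k2 : (2:Int) ∈ pvBands i <;> by_cases k3 : (3:Int) ∈ pvBands i <;>
    by_cases k4 : (4:Int) ∈ pvBands i <;>
    simp [k0, k1, k2, k3, k4, List.filter]

theorem len_pvBands_le (i : List Int) : PySem.Set.len (pvBands i) ≤ 5 := by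
  rw [len_pvBands_eq_filter]
  have hle := List.length_filter_le (fun t => decide (t ∈ pvBands i)) [0,1,2,3,4]
  have h5 : ([0,1,2,3,4] : List Int).length = 5 := by rfl
  omega

theorem key_iff (i : List Int) :
    (2 < pvColorCount i ∧ pvColorCount i < 6) ↔
    (3 ≤ PySem.Set.len (pvBands i) ∧ PySem.Set.len (pvBands i) ≤ 5) := by
  have h := count_eq_len i
  have h5 := len_pvBands_le i
  omega

-- ===== VERDICT (by name: the statement is the Claim_ definition above) =====
theorem addColorNums_spec : Claim_equal_addColorNums := by
  intro possible_nums hdom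
  clear hdom
  unfold Spec_addColorNums addColorNums addColorNums_alt
  suffices h : ∀ acc : List (List Int),
      possible_nums.foldl (fun add_color_nums i =>
        let color_count := pvColorCount i
        if 2 < color_count ∧ color_count < 6 then add_color_nums ++ [i] else add_color_nums) acc =
      possible_nums.foldl (fun result combo =>
        let n := PySem.Set.len (pvBands combo)
        if 3 ≤ n ∧ n ≤ 5 then result ++ [combo] else result) acc by
    exact h []
  induction possible_nums with
  | nil => intro acc; rfl
  | cons a t ih =>
    intro acc
    simp only [List.foldl_cons]
    rw [if_congr (key_iff a) rfl rfl, ih]
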